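-- pv_equiv track=rewrite | github.com/maeeri/tira | Wk5/robot.py | count
-- ===== SOURCE A (Python) =====
-- def count(s):
--     dict = {}
--     sq = (0, 0)
--     dict[sq] = 1
--     for c in s:
--         m = move(c)
--         sq = (sq[0] + m[0], sq[1] + m[1])
--         if sq not in dict.keys():
--             dict[sq] = 1
--         else:
--             dict[sq] += 1
--     return len(dict)
--
-- def move(c):
--     match c:
--         case 'L':
--             return (-1, 0)
--         case 'R':
--             return (1, 0)
--         case 'U':
--             return (0, -1)
--         case 'D':
--             return (0, 1)
-- ===== SOURCE B (Python) =====
-- def count(s):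
--     # Generate the whole path, then sort it and count runs: distinct squares =
--     # 1 + number of adjacent unequal pairs in the sorted path. No membership
--     # tests or hashing at all.
--     pos = (0, 0)
--     path = [pos]
--     for c in s:
--         m = move(c)
--         pos = (pos[0] + m[0], pos[1] + m[1])
--         path.append(pos)
--     path.sort()
--     n = 1
--     prev = path[0]
--     for p in path[1:]:
--         if p != prev:
--             n += 1
--         prev = p
--     return n
--
-- def move(c):
--     match c:
--         case 'L':
--             return (-1, 0)
--         case 'R':
--             return (1, 0)
--         case 'U':
--             return (0, -1)
--         case 'D':
--             return (0, 1)
-- ===== Notes on version B (the rewrite author's own statement) =====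
-- stated objective: alternative
-- what changed: A walks the path maintaining a dict of per-square visit counts with a membership-test branch; B generates the whole path, sorts it, and counts runs (1 + adjacent unequal pairs) - sort-then-scan dedup with no membership tests or hashing.
-- outside the precondition, e.g. on count('X'): A raises TypeError, B raises TypeError
import Mathlib
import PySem

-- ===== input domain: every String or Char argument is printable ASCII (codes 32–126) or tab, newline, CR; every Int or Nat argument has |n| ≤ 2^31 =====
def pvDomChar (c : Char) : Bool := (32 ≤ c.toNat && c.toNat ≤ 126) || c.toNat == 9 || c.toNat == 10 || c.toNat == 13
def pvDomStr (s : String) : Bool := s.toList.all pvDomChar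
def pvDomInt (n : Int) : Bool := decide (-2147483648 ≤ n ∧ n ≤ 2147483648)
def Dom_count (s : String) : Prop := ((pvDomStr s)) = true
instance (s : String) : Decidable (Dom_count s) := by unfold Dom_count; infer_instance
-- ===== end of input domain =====

-- B replaces A's membership-branching visit dict by sort-then-scan: generate the path, sort it, count runs (objective: alternative).


-- ===== PORT A =====
-- move(c): returns none exactly where Python's move returns None (a later subscript raises TypeError — excluded by Pre_)
def pvMove (c : Char) : Option (Int × Int) :=
  if c = 'L' then some (-1, 0)
  else if c = 'R' then some (1, 0)
  else if c = 'U' then some (0, -1)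
  else if c = 'D' then some (0, 1)
  else none

def count (s : String) : Int :=
  let st := s.toList.foldl
    (fun (acc : PySem.Dict (Int × Int) Int × (Int × Int)) c =>
      let m := (pvMove c).getD (0, 0)   -- none only outside Pre_count (Python raises TypeError there)
      let sq := (acc.2.1 + m.1, acc.2.2 + m.2)
      let d := if acc.1.contains sq then acc.1.modify sq 0 (· + 1) else acc.1.insert sq 1
      (d, sq))
    ((PySem.Dict.empty.insert ((0 : Int), (0 : Int)) 1), ((0 : Int), (0 : Int)))
  (st.1.size : Int)

-- ===== PORT B =====
def count_alt (s : String) : Int :=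
  let st := s.toList.foldl
    (fun (acc : List (Int × Int) × (Int × Int)) c =>
      let m := (pvMove c).getD (0, 0)   -- none only outside Pre_count (Python raises TypeError there)
      let p := (acc.2.1 + m.1, acc.2.2 + m.2)
      (acc.1 ++ [p], p))
    ([((0 : Int), (0 : Int))], ((0 : Int), (0 : Int)))
  -- path.sort(): Python's tuple sort is the lexicographic order
  let sortedPath := PySem.List.sorted st.1 (fun p => toLex p)
  match sortedPath with
  | [] => 0   -- unreachable: the path always contains the origin (Python's path[0] never raises)
  | p0 :: rest =>
    (rest.foldl (fun (acc : (Int × Int) × Int) p =>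
        (p, if p ≠ acc.1 then acc.2 + 1 else acc.2)) (p0, (1 : Int))).2

-- ===== PRECONDITION & SPEC =====
-- Pre_ excludes strings containing a character other than L/R/U/D: there move(c) returns None and
-- both A and B raise TypeError subscripting it.
def Pre_count (s : String) : Prop := (s.toList.all (fun c => c == 'L' || c == 'R' || c == 'U' || c == 'D')) = true
instance (s : String) : Decidable (Pre_count s) := by unfold Pre_count; infer_instance
def pvWitness_count : String := "LRUD"
def Spec_count (s : String) (out : Int) : Prop := out = count_alt s
instance (s : String) (out : Int) : Decidable (Spec_count s out) := by unfold Spec_count; infer_instance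

-- ===== CLAIM (what is proved, stated in full; the proofs are below) =====
def Claim_equal_count : Prop := ∀ (s : String), Dom_count s → Pre_count s → Spec_count s (count s)

-- ===== LEMMAS AND PROOFS =====

lemma pvSet_ofList_append (vs : List (Int × Int)) (p : Int × Int) :
    PySem.Set.ofList (vs ++ [p]) = PySem.Set.add (PySem.Set.ofList vs) p := by
  simp [PySem.Set.ofList_eq_foldl, List.foldl_append]

-- invariant: A's dict keys are exactly B's path list as a set, and the current squares agree
lemma pvInv (cs : List Char) (d : PySem.Dict (Int × Int) Int) (vs : List (Int × Int)) (sq : Int × Int)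
    (h : d.keys = PySem.Set.ofList vs) :
    (cs.foldl (fun (acc : PySem.Dict (Int × Int) Int × (Int × Int)) c =>
        let m := (pvMove c).getD (0, 0)
        let sq := (acc.2.1 + m.1, acc.2.2 + m.2)
        let d := if acc.1.contains sq then acc.1.modify sq 0 (· + 1) else acc.1.insert sq 1
        (d, sq)) (d, sq)).1.keys
      = PySem.Set.ofList (cs.foldl (fun (acc : List (Int × Int) × (Int × Int)) c =>
        let m := (pvMove c).getD (0, 0)
        let p := (acc.2.1 + m.1, acc.2.2 + m.2)
        (acc.1 ++ [p], p)) (vs, sq)).1 := by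
  induction cs generalizing d vs sq with
  | nil => simpa using h
  | cons c cs ih =>
    simp only [List.foldl_cons]
    apply ih
    rw [pvSet_ofList_append, ← h]
    by_cases hc : d.contains (sq.1 + ((pvMove c).getD (0,0)).1, sq.2 + ((pvMove c).getD (0,0)).2)
    · rw [if_pos hc, PySem.Dict.keys_modify,
        PySem.Dict.keys_insert_of_contains _ _ hc]
      have hm : (sq.1 + ((pvMove c).getD (0,0)).1, sq.2 + ((pvMove c).getD (0,0)).2) ∈ d.keys := by
        rwa [← PySem.Dict.contains_iff_mem_keys]
      simp [PySem.Set.add, PySem.Set.contains, hm]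
    · rw [if_neg hc, PySem.Dict.keys_insert_of_not_contains _ _ (by simpa using hc)]
      have hm : (sq.1 + ((pvMove c).getD (0,0)).1, sq.2 + ((pvMove c).getD (0,0)).2) ∉ d.keys := by
        rw [← PySem.Dict.contains_iff_mem_keys]; simpa using hc
      simp [PySem.Set.add, PySem.Set.contains, hm]

-- the path fold only appends: its first start list is a prefix of the result
lemma pvPathPrefix (cs : List Char) (vs : List (Int × Int)) (sq : Int × Int) :
    vs <+: (cs.foldl (fun (acc : List (Int × Int) × (Int × Int)) c =>
        let m := (pvMove c).getD (0, 0)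
        let p := (acc.2.1 + m.1, acc.2.2 + m.2)
        (acc.1 ++ [p], p)) (vs, sq)).1 := by
  induction cs generalizing vs sq with
  | nil => simp
  | cons c cs ih =>
    simp only [List.foldl_cons]
    exact List.IsPrefix.trans (List.prefix_append _ _) (ih _ _)

-- the run-count's counter is an offset: the step only ever adds to it
lemma pvScanOffset (l : List (Int × Int)) (p : Int × Int) (c : Int) :
    (l.foldl (fun (acc : (Int × Int) × Int) q =>
        (q, if q ≠ acc.1 then acc.2 + 1 else acc.2)) (p, c)).2
      = c + (l.foldl (fun (acc : (Int × Int) × Int) q =>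
        (q, if q ≠ acc.1 then acc.2 + 1 else acc.2)) (p, 0)).2 := by
  induction l generalizing p c with
  | nil => simp
  | cons b t ih =>
    simp only [List.foldl_cons]
    by_cases hb : b ≠ p
    · rw [if_pos hb, if_pos hb, ih b (c + 1), ih b (0 + 1)]; ring
    · rw [if_neg hb, if_neg hb, ih b c]

-- on a lexicographically sorted nonempty list, the run count is the number of distinct elements
lemma pvRunCount (l : List (Int × Int)) (a : Int × Int)
    (h : List.Pairwise (fun x y => toLex x ≤ toLex y) (a :: l)) :
    (l.foldl (fun (acc : (Int × Int) × Int) p =>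
        (p, if p ≠ acc.1 then acc.2 + 1 else acc.2)) (a, (1 : Int))).2
      = ((a :: l).toFinset.card : Int) := by
  induction l generalizing a with
  | nil => simp
  | cons b t ih =>
    have htl : List.Pairwise (fun x y => toLex x ≤ toLex y) (b :: t) := h.of_cons
    simp only [List.foldl_cons]
    by_cases hb : b ≠ a
    · rw [if_pos hb, pvScanOffset t b (1 + 1)]
      have h1 := pvScanOffset t b 1
      rw [ih b htl] at h1
      have hab : toLex a ≤ toLex b := (List.pairwise_cons.mp h).1 b (by simp)
      have hlt : toLex a < toLex b := lt_of_le_of_ne hab (by simpa [toLex_inj] using Ne.symm hb)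
      have hnotin : a ∉ (b :: t) := by
        intro hmem
        rcases List.mem_cons.mp hmem with rfl | hmt
        · exact absurd rfl (Ne.symm hb)
        · have hbx : toLex b ≤ toLex a := (List.pairwise_cons.mp htl).1 a hmt
          exact absurd (lt_of_lt_of_le hlt hbx) (lt_irrefl _)
      have : (a :: b :: t).toFinset.card = (b :: t).toFinset.card + 1 := by
        simp only [List.toFinset_cons (a := a)]
        rw [Finset.card_insert_of_notMem (by simpa using hnotin)]
      rw [this]; push_cast; linarith
    · rw [if_neg hb]
      push Not at hb; subst hb
      rw [ih b htl]
      simp [List.toFinset_cons]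

-- number of distinct elements of any list, as first-insertion dedup
lemma pvSetLen (l : List (Int × Int)) :
    ((PySem.Set.ofList l).length : Int) = (l.toFinset.card : Int) := by
  have h1 : (PySem.Set.ofList l).toFinset = l.toFinset := by
    apply Finset.ext; intro x
    simp [List.mem_toFinset, PySem.Set.mem_ofList]
  rw [← h1, List.toFinset_card_of_nodup (PySem.Set.nodup_ofList l)]

-- ===== VERDICT (by name: the statement is the Claim_ definition above) =====
theorem count_spec : Claim_equal_count := by
  intro s _ _
  unfold Spec_count count count_alt
  have h := pvInv s.toList (PySem.Dict.empty.insert ((0:Int),(0:Int)) 1) [((0:Int),(0:Int))] ((0:Int),(0:Int)) (by rfl)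
  simp only []
  set path := (s.toList.foldl (fun (acc : List (Int × Int) × (Int × Int)) c =>
      let m := (pvMove c).getD (0, 0)
      let p := (acc.2.1 + m.1, acc.2.2 + m.2)
      (acc.1 ++ [p], p)) ([((0 : Int), (0 : Int))], ((0 : Int), (0 : Int)))).1 with hpath
  have hsz : ∀ (d : PySem.Dict (Int × Int) Int), d.size = d.keys.length := by
    intro d; simp [PySem.Dict.size, PySem.Dict.keys]
  rw [hsz, h]
  -- LHS is now the distinct count of path; rewrite it through toFinset and match on the sorted list
  have hperm := PySem.List.sorted_perm path (fun p => toLex p) false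
  have hpw := PySem.List.sorted_pairwise path (fun p => toLex p)
  have hne : PySem.List.sorted path (fun p => toLex p) ≠ [] := by
    intro h0
    have hpl : path = [] := List.eq_nil_of_length_eq_zero (by rw [← hperm.length_eq, h0]; rfl)
    have hpre : ([((0:Int),(0:Int))] : List (Int × Int)) <+: path := by
      rw [hpath]; exact pvPathPrefix _ _ _
    rw [hpl] at hpre
    simpa using hpre.length_le
  cases hsp : PySem.List.sorted path (fun p => toLex p) with
  | nil => exact absurd hsp hne
  | cons p0 rest =>
    rw [hsp] at hperm hpw
    rw [pvSetLen, ← List.toFinset_eq_of_perm _ _ hperm, ← pvRunCount rest p0 hpw]
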